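-- pv_equiv track=rewrite | github.com/Ryan47Liao/GPK | Plan_load.py | get_task_info
-- ===== SOURCE A (Python) =====
-- def get_task_info(KeyResult):
--     deadline = None
--     time = None
--     difficulty = None
--     line = KeyResult
--     temp = line.replace("}","").split("{")[-1].split(",")
--     for i in temp:
--         if i.split(":")[0].strip() == "deadline":
--             deadline = i.split(":")[1].strip()
--         elif i.split(":")[0].strip() == "time":
--             time = i.split(":")[1].strip()
--         elif i.split(":")[0].strip() == "difficulty":
--             difficulty = i.split(":")[1].strip()
--     return deadline,time,difficulty
-- ===== SOURCE B (Python) =====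
-- def get_task_info(KeyResult):
--     # Staged passes: one independent backward search per key with early return,
--     # instead of a single forward pass maintaining three accumulators.
--     tokens = KeyResult.replace("}", "").split("{")[-1].split(",")
--
--     def pick(key):
--         for tok in reversed(tokens):
--             parts = tok.split(":")
--             if parts[0].strip() == key:
--                 return parts[1].strip()
--         return None
--
--     return pick("deadline"), pick("time"), pick("difficulty")
-- ===== Notes on version B (the rewrite author's own statement) =====
-- stated objective: alternative
-- what changed: Replaces A's single forward pass with a three-way elif branch and three overwritten accumulators by three independent staged searches: for each key, a backward scan over the tokens that early-returns the first (= last) match, with no accumulator at all.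
import Mathlib
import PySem

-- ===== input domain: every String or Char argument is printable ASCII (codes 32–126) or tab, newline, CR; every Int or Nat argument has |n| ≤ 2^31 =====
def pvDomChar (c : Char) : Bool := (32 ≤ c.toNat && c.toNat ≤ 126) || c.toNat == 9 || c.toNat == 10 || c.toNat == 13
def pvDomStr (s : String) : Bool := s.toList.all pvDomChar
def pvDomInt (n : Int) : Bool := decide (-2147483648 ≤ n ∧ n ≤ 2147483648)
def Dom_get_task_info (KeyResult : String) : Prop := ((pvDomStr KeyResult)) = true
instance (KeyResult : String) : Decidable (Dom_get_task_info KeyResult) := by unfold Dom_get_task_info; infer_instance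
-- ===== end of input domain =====

-- B replaces A's single forward pass (three-way elif branch, three overwritten accumulators)
-- by three independent staged backward searches, one per key, each early-returning its first
-- (= last) match; an alternative decomposition of the same cost.

-- shared primitives both Pythons compute on a token i:
-- pvTokens = KeyResult.replace("}","").split("{")[-1].split(",") (the [-1] exists: split is never empty)
-- pvKey i  = i.split(":")[0].strip()
-- pvVal i  = i.split(":")[1].strip() as an Option (none = IndexError)
-- s.split(sep) for the literal nonempty separators used here (split? is some since sep ≠ "")
def pvSplit (s sep : String) : List String := (PySem.Str.split? s sep).getD []
def pvTokens (KeyResult : String) : List String :=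
  pvSplit ((pvSplit (PySem.Str.replace KeyResult "}" "") "{").getLastD "") ","
def pvKey (i : String) : String := PySem.Str.strip (((pvSplit i ":").headD ""))
def pvVal (i : String) : Option String :=
  (PySem.List.pyGet? (pvSplit i ":") 1).map PySem.Str.strip

-- ===== PORT A =====
-- the for loop: if/elif chain overwriting the matching variable; outer none = IndexError
def pvLoopA : (Option String × Option String × Option String) → List String →
    Option (Option String × Option String × Option String)
  | s, [] => some s
  | (d, t, f), i :: rest =>
    if pvKey i == "deadline" then
      match pvVal i with
      | none => none
      | some v => pvLoopA (some v, t, f) rest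
    else if pvKey i == "time" then
      match pvVal i with
      | none => none
      | some v => pvLoopA (d, some v, f) rest
    else if pvKey i == "difficulty" then
      match pvVal i with
      | none => none
      | some v => pvLoopA (d, t, some v) rest
    else pvLoopA (d, t, f) rest

def get_task_info (KeyResult : String) : Option String × Option String × Option String :=
  (pvLoopA (none, none, none) (pvTokens KeyResult)).getD (none, none, none)

-- ===== PORT B =====
-- pick(key): scan the reversed tokens, early-return on the first match
-- (outer none = IndexError; some none = the loop fell through and returned None)
def pvPickB (key : String) : List String → Option (Option String)
  | [] => some none
  | i :: rest =>
    if pvKey i == key then (pvVal i).map some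
    else pvPickB key rest

def get_task_info_alt (KeyResult : String) : Option String × Option String × Option String :=
  let rev := (pvTokens KeyResult).reverse
  match pvPickB "deadline" rev, pvPickB "time" rev, pvPickB "difficulty" rev with
  | some d, some t, some f => (d, t, f)
  | _, _, _ => (none, none, none)

-- ===== PRECONDITION & SPEC =====
-- Pre_ excludes exactly the inputs on which A raises IndexError: a comma-separated token
-- lacking a colon separator whose stripped text is one of the three keywords, so the
-- second split part that A indexes does not exist.
def Pre_get_task_info (KeyResult : String) : Prop :=
  ∀ i ∈ pvTokens KeyResult,
    pvKey i ∈ (["deadline", "time", "difficulty"] : List String) →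
      2 ≤ (pvSplit i ":").length
instance (KeyResult : String) : Decidable (Pre_get_task_info KeyResult) := by
  unfold Pre_get_task_info; infer_instance

def pvWitness_get_task_info : String := "{deadline: 3, time: 2h, difficulty: 5}"

def Spec_get_task_info (KeyResult : String) (out : Option String × Option String × Option String) : Prop := out = get_task_info_alt KeyResult
instance (KeyResult : String) (out : Option String × Option String × Option String) : Decidable (Spec_get_task_info KeyResult out) := by unfold Spec_get_task_info; infer_instance

-- ===== CLAIM (what is proved, stated in full; the proofs are below) =====
def Claim_equal_get_task_info : Prop := ∀ (KeyResult : String), Dom_get_task_info KeyResult → Pre_get_task_info KeyResult → Spec_get_task_info KeyResult (get_task_info KeyResult)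

-- ===== LEMMAS AND PROOFS =====

-- value of the LAST token of l whose key is k (first of l.reverse)
def pvPick (k : String) (l : List String) : Option String :=
  (l.reverse.find? (fun i => pvKey i == k)).bind pvVal
-- the per-token non-raising condition of Pre_
def pvOK (i : String) : Prop :=
  pvKey i ∈ (["deadline", "time", "difficulty"] : List String) →
    2 ≤ (pvSplit i ":").length

theorem pvVal_isSome (i : String) (h : 2 ≤ (pvSplit i ":").length) :
    ∃ v, pvVal i = some v := by
  unfold pvVal
  have h1 : (PySem.List.pyGet? (pvSplit i ":") 1).isSome := by
    simp only [PySem.List.pyGet?, PySem.List.pyIdx?]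
    split_ifs with h1 h2 <;> simp_all
    omega
  rcases Option.isSome_iff_exists.mp h1 with ⟨v, hv⟩
  exact ⟨PySem.Str.strip v, by simp [hv]⟩

theorem pvPick_cons (k : String) (i : String) (l : List String)
    (hsome : ∀ j ∈ l, pvKey j = k → (pvVal j).isSome) :
    pvPick k (i :: l) =
      (pvPick k l).or (if pvKey i == k then pvVal i else none) := by
  unfold pvPick
  simp only [List.reverse_cons, List.find?_append]
  cases h : List.find? (fun i => pvKey i == k) l.reverse with
  | some j =>
    have hj : pvKey j = k := by simpa using List.find?_some h
    have hm : j ∈ l := List.mem_reverse.mp (List.mem_of_find?_eq_some h)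
    rcases Option.isSome_iff_exists.mp (hsome j hm hj) with ⟨w, hw⟩
    simp [hw, Option.or]
  | none =>
    rw [Option.none_or, Option.bind_none, Option.none_or, List.find?_singleton]
    cases hk : pvKey i == k
    · rw [if_neg (by simp), if_neg (by simp), Option.bind_none]
    · rw [if_pos (by simp), if_pos (by simp), Option.bind_some]

theorem pvOK_some (i k : String) (hPi : pvOK i)
    (hk : k ∈ (["deadline", "time", "difficulty"] : List String)) (h : pvKey i = k) :
    (pvVal i).isSome := by
  rcases pvVal_isSome i (hPi (h ▸ hk)) with ⟨v, hv⟩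
  simp [hv]

theorem pvLoopA_eq (l : List String) (hP : ∀ i ∈ l, pvOK i) :
    ∀ d t f, pvLoopA (d, t, f) l =
      some ((pvPick "deadline" l).or d, (pvPick "time" l).or t, (pvPick "difficulty" l).or f) := by
  induction l with
  | nil => intro d t f; simp [pvLoopA, pvPick]
  | cons i rest ih =>
    intro d t f
    have hPi : pvOK i := hP i (by simp)
    have hPrest : ∀ j ∈ rest, pvOK j := fun j hj => hP j (by simp [hj])
    have ih' := ih hPrest
    have hsome : ∀ (k : String), k ∈ (["deadline", "time", "difficulty"] : List String) →
        ∀ j ∈ rest, pvKey j = k → (pvVal j).isSome :=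
      fun k hk j hj => pvOK_some j k (hPrest j hj) hk
    rw [pvPick_cons _ _ _ (hsome _ (by simp)), pvPick_cons _ _ _ (hsome _ (by simp)),
        pvPick_cons _ _ _ (hsome _ (by simp))]
    by_cases hd : pvKey i = "deadline"
    · rcases pvVal_isSome i (hPi (by simp [hd])) with ⟨v, hv⟩
      simp [pvLoopA, hd, hv, ih']
    · by_cases ht : pvKey i = "time"
      · rcases pvVal_isSome i (hPi (by simp [ht])) with ⟨v, hv⟩
        simp [pvLoopA, ht, hv, ih']
      · by_cases hf : pvKey i = "difficulty"
        · rcases pvVal_isSome i (hPi (by simp [hf])) with ⟨v, hv⟩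
          simp [pvLoopA, hf, hv, ih']
        · simp [pvLoopA, hd, ht, hf, ih']

-- B's backward search returns exactly the last-match value pvPick, under Pre_
theorem pvPickB_eq (k : String) (hk : k ∈ (["deadline", "time", "difficulty"] : List String))
    (m : List String) (hP : ∀ i ∈ m, pvOK i) :
    pvPickB k m = some ((m.find? (fun i => pvKey i == k)).bind pvVal) := by
  induction m with
  | nil => simp [pvPickB]
  | cons i rest ih =>
    by_cases hki : pvKey i = k
    · rcases Option.isSome_iff_exists.mp
        (pvOK_some i k (hP i (by simp)) hk hki) with ⟨v, hv⟩
      simp [pvPickB, hki, hv]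
    · have := ih (fun j hj => hP j (by simp [hj]))
      simp [pvPickB, hki, this]

theorem get_task_info_spec : Claim_equal_get_task_info := by
  intro KeyResult _ hPre
  unfold Spec_get_task_info get_task_info get_task_info_alt
  have hP : ∀ i ∈ pvTokens KeyResult, pvOK i := hPre
  have hPrev : ∀ i ∈ (pvTokens KeyResult).reverse, pvOK i := by
    intro i hi; exact hP i (List.mem_reverse.mp hi)
  have hA := pvLoopA_eq (pvTokens KeyResult) hP none none none
  rw [hA]
  simp only [pvPickB_eq "deadline" (by simp) _ hPrev,
    pvPickB_eq "time" (by simp) _ hPrev,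
    pvPickB_eq "difficulty" (by simp) _ hPrev]
  simp [pvPick]
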